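-- pv_equiv track=rewrite | github.com/pratamayusuf3/Algorithm | Turing3.py | solution
-- ===== SOURCE A (Python) =====
-- def solution(k):
--
--     # jumlah total selisih absolut antara digit angka-angka pada semua pasangan elemen array
--
--     result = 0
--
--     for i in range (1,len(k)):
--         for j in range (0,i):
--             temp1 = k[i]
--             temp2 = k[j]
--             while temp1 > 0 and temp2 > 0:
--                 # ambil digit paling kanan
--                 digit1 = temp1 % 10
--                 digit2 = temp2 % 10
--                 if digit1 > digit2:
--                     diff = digit1 - digit2
--                 else:
--                     diff = digit2 - digit1
--                 # jumlahkan selisih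
--                 result += diff
--                 # maju ke digit selanjut nya
--                 temp1 = temp1 // 10
--                 temp2 = temp2 // 10
--     return result
-- ===== SOURCE B (Python) =====
-- def solution(k):
--     # One pass: per digit-position d, maintain counts of digits of previous
--     # (still-active) numbers; each new number is charged against those counts.
--     counts = {}
--     result = 0
--     for x in k:
--         if x > 0:
--             t = x
--             d = 0
--             while t > 0:
--                 dig = t % 10
--                 for v in range(10):
--                     result += counts.get((d, v), 0) * abs(dig - v)
--                 counts[(d, dig)] = counts.get((d, dig), 0) + 1
--                 t //= 10
--                 d += 1
--     return result
-- ===== Notes on version B (the rewrite author's own statement) =====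
-- stated objective: faster
-- what changed: Replaced the all-pairs double loop (each pair walked digit by digit) by a single pass that maintains, per digit position, a counter of the digits of previous still-active numbers and charges each new number against those counts.
import Mathlib
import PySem

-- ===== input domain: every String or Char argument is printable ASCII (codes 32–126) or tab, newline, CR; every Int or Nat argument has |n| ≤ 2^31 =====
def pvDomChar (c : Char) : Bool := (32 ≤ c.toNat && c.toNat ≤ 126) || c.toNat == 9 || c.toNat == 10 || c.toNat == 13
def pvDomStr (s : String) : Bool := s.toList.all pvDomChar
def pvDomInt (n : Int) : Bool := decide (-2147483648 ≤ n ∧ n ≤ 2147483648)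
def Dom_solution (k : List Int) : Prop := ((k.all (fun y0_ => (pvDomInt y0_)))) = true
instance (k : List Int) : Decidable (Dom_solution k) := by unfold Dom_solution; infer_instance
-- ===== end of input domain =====

-- B replaces A's all-pairs digit walk by a single pass with per-position digit counters; proved to return A's value on every input.

-- ===== PORT A =====
-- the 'while temp1 > 0 and temp2 > 0' loop of A, as a recursion on temp1
def pairLoop (t1 t2 : Int) : Int :=
  if h : t1 > 0 ∧ t2 > 0 then
    (if PySem.Int.mod t1 10 > PySem.Int.mod t2 10
      then PySem.Int.mod t1 10 - PySem.Int.mod t2 10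
      else PySem.Int.mod t2 10 - PySem.Int.mod t1 10) +
      pairLoop (PySem.Int.floordiv t1 10) (PySem.Int.floordiv t2 10)
  else 0
termination_by t1.toNat
decreasing_by
  rw [PySem.Int.floordiv_eq_ediv_of_pos (by omega)]
  omega

def solution (k : List Int) : Int :=
  (PySem.List.pyRange 1 (k.length : Int) 1).foldl (fun result i =>
    (PySem.List.pyRange 0 i 1).foldl (fun result j =>
      result + pairLoop (PySem.List.pyGetD k i 0) (PySem.List.pyGetD k j 0)) result) 0

-- ===== PORT B =====
-- 'for v in range(10): result += counts.get((d, v), 0) * abs(dig - v)'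
def innerLoop (counts : PySem.Dict (Int × Int) Int) (d dig result : Int) : Int :=
  (PySem.List.pyRange 0 10 1).foldl (fun r v => r + counts.getD (d, v) 0 * |dig - v|) result

-- the 'while t > 0' loop of B: charge t's digit at position d against the counters, then record it
def digLoop (counts : PySem.Dict (Int × Int) Int) (result t d : Int) :
    PySem.Dict (Int × Int) Int × Int :=
  if h : t > 0 then
    digLoop
      (counts.insert (d, PySem.Int.mod t 10) (counts.getD (d, PySem.Int.mod t 10) 0 + 1))
      (innerLoop counts d (PySem.Int.mod t 10) result)
      (PySem.Int.floordiv t 10) (d + 1)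
  else (counts, result)
termination_by t.toNat
decreasing_by
  rw [PySem.Int.floordiv_eq_ediv_of_pos (by omega)]
  omega

def solution_alt (k : List Int) : Int :=
  (k.foldl (fun st x => if x > 0 then digLoop st.1 st.2 x 0 else st)
    ((PySem.Dict.empty : PySem.Dict (Int × Int) Int), (0 : Int))).2

-- ===== PRECONDITION & SPEC =====
def Spec_solution (k : List Int) (out : Int) : Prop := out = solution_alt k
instance (k : List Int) (out : Int) : Decidable (Spec_solution k out) := by unfold Spec_solution; infer_instance

-- ===== CLAIM (what is proved, stated in full; the proofs are below) =====
def Claim_equal_solution : Prop := ∀ (k : List Int), Dom_solution k → Spec_solution k (solution k)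

-- ===== LEMMAS AND PROOFS =====

-- y // 10 // 10 // … (m times)
def sh (y : Int) : Nat → Int
  | 0 => y
  | n + 1 => PySem.Int.floordiv (sh y n) 10

-- number of y ∈ ys still active at position m whose digit there is v
def cnt (ys : List Int) (m : Nat) (v : Int) : Int :=
  (ys.countP (fun y => decide (0 < sh y m) && decide (PySem.Int.mod (sh y m) 10 = v)) : Int)

-- the pair sums A accumulates, element by element against the previous ones
def G : List Int → List Int → Int
  | _, [] => 0
  | ys, x :: xs => (ys.map (fun y => pairLoop x y)).sum + G (ys ++ [x]) xs

theorem sh_nonpos (y : Int) (hy : y ≤ 0) (m : Nat) : sh y m ≤ 0 := by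
  induction m with
  | zero => exact hy
  | succ n ih =>
      show PySem.Int.floordiv (sh y n) 10 ≤ 0
      rw [PySem.Int.floordiv_eq_ediv_of_pos (by omega)]
      omega

theorem sh_add (y : Int) (m j : Nat) : sh y (m + j) = sh (sh y m) j := by
  induction j with
  | zero => rfl
  | succ n ih => show PySem.Int.floordiv (sh y (m + n)) 10 = _; rw [ih]; rfl

theorem pairLoop_of_nonpos (t1 t2 : Int) (h : t1 ≤ 0 ∨ t2 ≤ 0) : pairLoop t1 t2 = 0 := by
  rw [pairLoop, dif_neg (by omega)]

theorem pairLoop_step (t1 t2 : Int) (h : 0 < t1) :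
    pairLoop t1 t2 =
      (if 0 < t2 then
        (if PySem.Int.mod t1 10 > PySem.Int.mod t2 10
          then PySem.Int.mod t1 10 - PySem.Int.mod t2 10
          else PySem.Int.mod t2 10 - PySem.Int.mod t1 10)
       else 0) +
      pairLoop (PySem.Int.floordiv t1 10) (PySem.Int.floordiv t2 10) := by
  by_cases h2 : 0 < t2
  · rw [pairLoop, dif_pos ⟨h, h2⟩, if_pos h2]
  · rw [pairLoop_of_nonpos t1 t2 (Or.inr (by omega)), if_neg h2,
      pairLoop_of_nonpos _ _ (Or.inr ?_)]
    · ring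
    · rw [PySem.Int.floordiv_eq_ediv_of_pos (by omega)]
      omega

theorem cnt_cons (y : Int) (ys : List Int) (m : Nat) (v : Int) :
    cnt (y :: ys) m v =
      (if 0 < sh y m ∧ PySem.Int.mod (sh y m) 10 = v then 1 else 0) + cnt ys m v := by
  by_cases h1 : 0 < sh y m <;> by_cases h2 : PySem.Int.mod (sh y m) 10 = v <;>
    (try simp [cnt, List.countP_cons, h1, h2]) <;> (try push_cast) <;> (try ring)

theorem cnt_append_singleton (ys : List Int) (x : Int) (m : Nat) (v : Int) :
    cnt (ys ++ [x]) m v =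
      cnt ys m v + (if 0 < sh x m ∧ PySem.Int.mod (sh x m) 10 = v then 1 else 0) := by
  by_cases h1 : 0 < sh x m <;> by_cases h2 : PySem.Int.mod (sh x m) 10 = v <;>
    (try simp [cnt, List.countP_append, List.countP_cons, h1, h2]) <;>
    (try push_cast) <;> (try ring)

theorem habs (a b : Int) : (if a > b then a - b else b - a) = |a - b| := by
  rcases abs_cases (a - b) with ⟨h1, h2⟩ | ⟨h1, h2⟩ <;> split_ifs <;> omega

theorem sumMapAdd (l : List Int) (f g : Int → Int) :
    (l.map (fun v => f v + g v)).sum = (l.map f).sum + (l.map g).sum := by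
  induction l with
  | nil => simp
  | cons a l ih => simp [ih]; ring

-- Σ_{v=0}^{9} cnt ys m v * |dig - v| counts exactly the per-position contributions
theorem countSum (ys : List Int) (m : Nat) (dig : Int) :
    ((PySem.List.pyRange 0 10 1).map (fun v => cnt ys m v * |dig - v|)).sum
      = (ys.map (fun y =>
          if 0 < sh y m then |dig - PySem.Int.mod (sh y m) 10| else 0)).sum := by
  induction ys with
  | nil => simp [cnt]
  | cons y ys ih =>
      have hsplit : ∀ v : Int, cnt (y :: ys) m v * |dig - v|
          = (if 0 < sh y m ∧ PySem.Int.mod (sh y m) 10 = v then 1 else 0) * |dig - v|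
            + cnt ys m v * |dig - v| := fun v => by rw [cnt_cons]; ring
      simp only [hsplit]
      rw [sumMapAdd, ih]
      simp only [List.map_cons, List.sum_cons]
      have hy : ((PySem.List.pyRange 0 10 1).map (fun v =>
          (if 0 < sh y m ∧ PySem.Int.mod (sh y m) 10 = v then (1:Int) else 0) * |dig - v|)).sum
          = if 0 < sh y m then |dig - PySem.Int.mod (sh y m) 10| else 0 := by
        by_cases ha : 0 < sh y m
        · have h0 : 0 ≤ PySem.Int.mod (sh y m) 10 :=
            PySem.Int.mod_nonneg (a := sh y m) (b := 10) (by omega)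
          have h10 : PySem.Int.mod (sh y m) 10 < 10 :=
            PySem.Int.mod_lt (a := sh y m) (b := 10) (by omega)
          rw [if_pos ha]
          have hrange : PySem.List.pyRange 0 10 1 = [0,1,2,3,4,5,6,7,8,9] := by decide
          rw [hrange]
          set w := PySem.Int.mod (sh y m) 10 with hw
          interval_cases w <;> simp [ha]
        · rw [if_neg ha]
          have hz : ∀ v : Int,
              (if 0 < sh y m ∧ PySem.Int.mod (sh y m) 10 = v then (1:Int) else 0) * |dig - v|
                = 0 := fun v => by rw [if_neg (by tauto)]; ring
          simp only [hz]
          simp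
      rw [hy]

theorem digLoop_pos (counts : PySem.Dict (Int × Int) Int) (r t d : Int) (h : 0 < t) :
    digLoop counts r t d =
      digLoop
        (counts.insert (d, PySem.Int.mod t 10) (counts.getD (d, PySem.Int.mod t 10) 0 + 1))
        (innerLoop counts d (PySem.Int.mod t 10) r)
        (PySem.Int.floordiv t 10) (d + 1) := by
  rw [digLoop, dif_pos h]

theorem digLoop_neg (counts : PySem.Dict (Int × Int) Int) (r t d : Int) (h : ¬ 0 < t) :
    digLoop counts r t d = (counts, r) := by
  rw [digLoop, dif_neg h]

-- invariant step for B's while-loop over the digits of x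
theorem digLoop_spec (fuel : Nat) : ∀ (x : Int), 0 < x → ∀ (dn : Nat)
    (counts : PySem.Dict (Int × Int) Int) (r : Int) (ys : List Int),
    (sh x dn).toNat = fuel →
    (∀ (m : Nat) (v : Int), counts.getD ((m : Int), v) 0 =
        (if m < dn then cnt (ys ++ [x]) m v else cnt ys m v)) →
    (digLoop counts r (sh x dn) ((dn : Nat) : Int)).2 =
        r + (ys.map (fun y => pairLoop (sh x dn) (sh y dn))).sum ∧
      (∀ (m : Nat) (v : Int),
        (digLoop counts r (sh x dn) ((dn : Nat) : Int)).1.getD ((m : Int), v) 0 =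
          cnt (ys ++ [x]) m v) := by
  induction fuel using Nat.strong_induction_on with
  | _ fuel ih =>
  intro x hx dn counts r ys hfuel hinv
  by_cases ht : 0 < sh x dn
  · rw [digLoop_pos _ _ _ _ ht]
    have hstep : PySem.Int.floordiv (sh x dn) 10 = sh x (dn + 1) := rfl
    have hd1 : ((dn : Int) + 1) = ((dn + 1 : Nat) : Int) := by push_cast; ring
    rw [hstep, hd1]
    have hfuel' : (sh x (dn + 1)).toNat < fuel := by
      have he : sh x (dn + 1) = PySem.Int.floordiv (sh x dn) 10 := rfl
      rw [he, PySem.Int.floordiv_eq_ediv_of_pos (by omega)]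
      omega
    have hinv' : ∀ (m : Nat) (v : Int),
        (counts.insert ((dn : Int), PySem.Int.mod (sh x dn) 10)
          (counts.getD ((dn : Int), PySem.Int.mod (sh x dn) 10) 0 + 1)).getD ((m : Int), v) 0
        = (if m < dn + 1 then cnt (ys ++ [x]) m v else cnt ys m v) := by
      intro m v
      rw [PySem.Dict.getD_insert]
      by_cases hm : ((m : Int), v) = ((dn : Int), PySem.Int.mod (sh x dn) 10)
      · rw [if_pos hm]
        have hm1 : m = dn := by
          have := congrArg Prod.fst hm; simpa using this
        have hm2 : v = PySem.Int.mod (sh x dn) 10 := by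
          have := congrArg Prod.snd hm; simpa using this
        subst hm1
        subst hm2
        rw [hinv m _, if_neg (lt_irrefl m), if_pos (Nat.lt_succ_self m),
          cnt_append_singleton, if_pos ⟨ht, rfl⟩]
      · rw [if_neg hm, hinv m v]
        by_cases hmdn : m < dn
        · rw [if_pos hmdn, if_pos (by omega)]
        · rw [if_neg hmdn]
          by_cases hmdn1 : m < dn + 1
          · have hmeq : m = dn := by omega
            subst hmeq
            have hv : v ≠ PySem.Int.mod (sh x m) 10 := by
              intro h; exact hm (by rw [h])
            rw [if_pos hmdn1, cnt_append_singleton,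
              if_neg (by rintro ⟨-, h2⟩; exact hv h2.symm)]
            ring
          · rw [if_neg hmdn1]
    obtain ⟨ih2, ih1⟩ := ih _ hfuel' x hx (dn + 1) _ _ ys rfl hinv'
    refine ⟨?_, ih1⟩
    rw [ih2]
    have hrr : innerLoop counts ((dn : Nat) : Int) (PySem.Int.mod (sh x dn) 10) r
        = r + (ys.map (fun y =>
            if 0 < sh y dn then |PySem.Int.mod (sh x dn) 10 - PySem.Int.mod (sh y dn) 10|
            else 0)).sum := by
      unfold innerLoop
      rw [PySem.List.foldl_add]
      congr 1
      have hmap : (PySem.List.pyRange 0 10 1).map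
            (fun v => counts.getD (((dn : Nat) : Int), v) 0 * |PySem.Int.mod (sh x dn) 10 - v|)
          = (PySem.List.pyRange 0 10 1).map
            (fun v => cnt ys dn v * |PySem.Int.mod (sh x dn) 10 - v|) :=
        List.map_congr_left (fun v _ => by rw [hinv dn v, if_neg (lt_irrefl dn)])
      rw [hmap, countSum]
    rw [hrr]
    have hpair : ys.map (fun y => pairLoop (sh x dn) (sh y dn))
        = ys.map (fun y =>
            (if 0 < sh y dn then |PySem.Int.mod (sh x dn) 10 - PySem.Int.mod (sh y dn) 10|
             else 0) + pairLoop (sh x (dn + 1)) (sh y (dn + 1))) :=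
      List.map_congr_left (fun y _ => by
        rw [pairLoop_step _ _ ht, habs]; rfl)
    rw [hpair, sumMapAdd]
    ring
  · rw [digLoop_neg _ _ _ _ ht]
    constructor
    · show r = r + _
      have hz : ys.map (fun y => pairLoop (sh x dn) (sh y dn)) = ys.map (fun _ => (0:Int)) :=
        List.map_congr_left (fun y _ => pairLoop_of_nonpos _ _ (Or.inl (by omega)))
      rw [hz]; simp
    · intro m v
      show counts.getD _ _ = _
      rw [hinv m v]
      by_cases hm : m < dn
      · rw [if_pos hm]
      · rw [if_neg hm, cnt_append_singleton, if_neg ?_]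
        · ring
        · rintro ⟨h1, -⟩
          have hm' : dn + (m - dn) = m := by omega
          have h2 := sh_nonpos (sh x dn) (by omega) (m - dn)
          rw [← sh_add, hm'] at h2
          omega

-- B's fold over the list computes r + G ys xs under the counter invariant
theorem foldB_spec (xs : List Int) : ∀ (ys : List Int)
    (counts : PySem.Dict (Int × Int) Int) (r : Int),
    (∀ (m : Nat) (v : Int), counts.getD ((m : Int), v) 0 = cnt ys m v) →
    (xs.foldl (fun st x => if x > 0 then digLoop st.1 st.2 x 0 else st) (counts, r)).2
      = r + G ys xs := by
  induction xs with
  | nil => intro ys counts r _; simp [G]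
  | cons x xs ihx =>
      intro ys counts r hinv
      rw [List.foldl_cons]
      by_cases hx : x > 0
      · rw [if_pos hx]
        have h0 : sh x 0 = x := rfl
        have hinv0 : ∀ (m : Nat) (v : Int), counts.getD ((m : Int), v) 0 =
            (if m < 0 then cnt (ys ++ [x]) m v else cnt ys m v) := by
          intro m v; rw [if_neg (Nat.not_lt_zero m)]; exact hinv m v
        obtain ⟨h2, h1⟩ := digLoop_spec (sh x 0).toNat x hx 0 counts r ys rfl hinv0
        rw [h0] at h2 h1
        have hpair : digLoop counts r x ((0 : Nat) : Int)
            = ((digLoop counts r x ((0 : Nat) : Int)).1,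
               (digLoop counts r x ((0 : Nat) : Int)).2) := rfl
        have hcast : ((0 : Nat) : Int) = (0 : Int) := rfl
        rw [hcast] at hpair h2 h1
        rw [show digLoop counts r x 0
            = ((digLoop counts r x 0).1, (digLoop counts r x 0).2) from rfl]
        rw [ihx (ys ++ [x]) _ _ h1, h2]
        have hG : G ys (x :: xs)
            = (ys.map (fun y => pairLoop x y)).sum + G (ys ++ [x]) xs := rfl
        rw [hG]
        have hsh : ys.map (fun y => pairLoop x (sh y 0)) = ys.map (fun y => pairLoop x y) := rfl
        rw [hsh]
        ring
      · rw [if_neg hx]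
        have hinv' : ∀ (m : Nat) (v : Int), counts.getD ((m : Int), v) 0 = cnt (ys ++ [x]) m v := by
          intro m v
          rw [cnt_append_singleton, if_neg ?_]
          · rw [hinv m v]; ring
          · rintro ⟨h1, -⟩
            have := sh_nonpos x (by omega) m
            omega
        rw [ihx (ys ++ [x]) _ _ hinv']
        have hG : G ys (x :: xs)
            = (ys.map (fun y => pairLoop x y)).sum + G (ys ++ [x]) xs := rfl
        rw [hG]
        have hz : ys.map (fun y => pairLoop x y) = ys.map (fun _ => (0:Int)) :=
          List.map_congr_left (fun y _ => pairLoop_of_nonpos _ _ (Or.inl (by omega)))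
        rw [hz]; simp

theorem solution_alt_eq_G (k : List Int) : solution_alt k = G [] k := by
  unfold solution_alt
  rw [foldB_spec k [] _ 0 (by intro m v; simp [cnt, PySem.Dict.getD_empty])]
  ring

theorem G_append_singleton (xs : List Int) : ∀ (ys : List Int) (x : Int),
    G ys (xs ++ [x]) = G ys xs + ((ys ++ xs).map (fun y => pairLoop x y)).sum := by
  induction xs with
  | nil => intro ys x; simp [G]
  | cons x' xs ih =>
      intro ys x
      show (ys.map _).sum + G (ys ++ [x']) (xs ++ [x]) = _
      rw [ih (ys ++ [x']) x]
      show _ = (ys.map _).sum + G (ys ++ [x']) xs + ((ys ++ (x' :: xs)).map _).sum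
      have : ys ++ x' :: xs = (ys ++ [x']) ++ xs := by simp
      rw [this]
      ring

-- A as a sum over index ranges
theorem solution_eq_sum (k : List Int) :
    solution k = ((PySem.List.pyRange 1 (k.length : Int) 1).map (fun i =>
      ((PySem.List.pyRange 0 i 1).map (fun j =>
        pairLoop (PySem.List.pyGetD k i 0) (PySem.List.pyGetD k j 0))).sum)).sum := by
  unfold solution
  simp only [PySem.List.foldl_add]
  ring

theorem getD_append_lt (k : List Int) (x : Int) (i : Int) (h0 : 0 ≤ i)
    (h : i < (k.length : Int)) :
    PySem.List.pyGetD (k ++ [x]) i 0 = PySem.List.pyGetD k i 0 := by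
  have hi : i = ((i.toNat : Nat) : Int) := by omega
  rw [hi, PySem.List.pyGetD_natCast, PySem.List.pyGetD_natCast,
    List.getD_eq_getElem?_getD, List.getD_eq_getElem?_getD,
    List.getElem?_append_left (by omega)]

theorem solution_eq_G (k : List Int) : solution k = G [] k := by
  induction k using List.reverseRecOn with
  | nil => rfl
  | append_singleton k x ih =>
      rw [solution_eq_sum, G_append_singleton, ← ih, solution_eq_sum k]
      have hlen : (((k ++ [x]).length : Nat) : Int) = (k.length : Int) + 1 := by simp
      rw [hlen]
      rcases Nat.eq_zero_or_pos k.length with hn | hn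
      · have hk : k = [] := List.length_eq_zero_iff.mp hn
        subst hk
        simp [PySem.List.pyRange_one_eq_nil (by omega : (1:Int) ≤ 1)]
      · rw [PySem.List.pyRange_one_succ_right (by omega : (1:Int) ≤ (k.length : Int))]
        rw [List.map_append, List.sum_append]
        congr 1
        · congr 1
          apply List.map_congr_left
          intro i hi
          rw [PySem.List.mem_pyRange_one] at hi
          rw [getD_append_lt k x i (by omega) (by omega)]
          congr 1
          apply List.map_congr_left
          intro j hj
          rw [PySem.List.mem_pyRange_one] at hj
          rw [getD_append_lt k x j (by omega) (by omega)]
        · simp only [List.map_cons, List.map_nil, List.sum_cons, List.sum_nil, List.nil_append]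
          have hx : PySem.List.pyGetD (k ++ [x]) (k.length : Int) 0 = x := by
            rw [PySem.List.pyGetD_natCast, List.getD_eq_getElem?_getD,
              List.getElem?_concat_length]
            rfl
          rw [hx]
          have hcong : (PySem.List.pyRange 0 (k.length : Int) 1).map
                (fun j => pairLoop x (PySem.List.pyGetD (k ++ [x]) j 0))
              = (PySem.List.pyRange 0 (k.length : Int) 1).map
                (fun j => pairLoop x (PySem.List.pyGetD k j 0)) :=
            List.map_congr_left (fun j hj => by
              rw [PySem.List.mem_pyRange_one] at hj
              rw [getD_append_lt k x j hj.1 hj.2])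
          rw [hcong]
          have hmm : (PySem.List.pyRange 0 (k.length : Int) 1).map
                (fun j => pairLoop x (PySem.List.pyGetD k j 0))
              = ((PySem.List.pyRange 0 (k.length : Int) 1).map
                  (fun j => PySem.List.pyGetD k j 0)).map (fun y => pairLoop x y) := by
            rw [List.map_map]; rfl
          rw [hmm, PySem.List.map_pyGetD_pyRange_zero']
          ring

-- ===== VERDICT (by name: the statement is the Claim_ definition above) =====
theorem solution_spec : Claim_equal_solution := by
  intro k _
  show solution k = solution_alt k
  rw [solution_eq_G, solution_alt_eq_G]
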